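-- pv_equiv track=rewrite | github.com/joshband/copy-that | src/copy_that/generators/css_generator.py | _to_css_variable_name
-- ===== SOURCE A (Python) =====
-- def _to_css_variable_name(name: str, role: str = "") -> str:
--     """
--     Convert token name to valid CSS variable name
--
--     Args:
--         name: Token name
--         role: Optional role prefix
--
--     Returns:
--         Valid CSS custom property name (--color-...)
--     """
--     # Sanitize name: remove special chars, convert to kebab-case
--     sanitized = name.replace(" ", "-").replace("&", "and")
--     sanitized = sanitized.replace("(", "").replace(")", "")
--     sanitized = "".join(c for c in sanitized if c.isalnum() or c == "-")
--     sanitized = sanitized.lower()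
--
--     # Remove multiple consecutive dashes
--     while "--" in sanitized:
--         sanitized = sanitized.replace("--", "-")
--
--     # Build variable name
--     if role and role != "default":
--         if sanitized == role:
--             var_name = f"--color-{role}"
--         else:
--             var_name = f"--color-{role}-{sanitized}"
--     else:
--         var_name = f"--color-{sanitized}"
--
--     return var_name
-- ===== SOURCE B (Python) =====
-- def _to_css_variable_name(name: str, role: str = "") -> str:
--     # single left-to-right pass with a previous-was-dash flag
--     out = []
--     prev_dash = False
--     for c in name:
--         if c == " " or c == "-":
--             if not prev_dash:
--                 out.append("-")
--                 prev_dash = True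
--         elif c == "&":
--             out.append("and")
--             prev_dash = False
--         elif c.isalnum():
--             out.append(c.lower())
--             prev_dash = False
--         # any other character is dropped and the flag is unchanged
--     sanitized = "".join(out)
--     if role and role != "default":
--         if sanitized == role:
--             return f"--color-{role}"
--         return f"--color-{role}-{sanitized}"
--     return f"--color-{sanitized}"
-- ===== Notes on version B (the rewrite author's own statement) =====
-- stated objective: alternative
-- what changed: Replaced A's chain of global scans (four str.replace passes, a join-filter pass, a lower pass, and a repeated rescan-and-replace loop collapsing double dashes) by a single left-to-right pass over the name that emits lowercase alphanumerics, expands ampersands, drops other characters, and keeps a previous-was-dash flag so dash runs collapse in the same pass.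
import Mathlib
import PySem

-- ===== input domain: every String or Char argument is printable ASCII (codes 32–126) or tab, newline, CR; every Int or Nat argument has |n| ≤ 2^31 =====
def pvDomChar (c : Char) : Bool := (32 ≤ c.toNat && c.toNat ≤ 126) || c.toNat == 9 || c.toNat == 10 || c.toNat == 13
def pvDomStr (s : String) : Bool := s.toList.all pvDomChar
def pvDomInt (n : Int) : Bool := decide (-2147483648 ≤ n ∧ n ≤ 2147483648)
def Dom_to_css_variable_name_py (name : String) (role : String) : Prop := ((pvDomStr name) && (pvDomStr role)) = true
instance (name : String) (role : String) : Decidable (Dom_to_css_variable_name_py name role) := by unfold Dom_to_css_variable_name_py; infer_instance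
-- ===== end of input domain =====

-- B replaces A's replace-chain + join-filter + lower + repeated '--'-collapse rescans by ONE
-- left-to-right pass with a previous-was-dash flag (objective: alternative single-pass decomposition).

-- ===== PORT A =====
-- termination lemma for the 'while "--" in sanitized' loop: each replace("--","-") strictly shrinks the string
theorem pv_replace_dd_len_lt (cs : List Char) (h : ['-', '-'] <:+: cs) :
    (PySem.Chars.replace cs ['-', '-'] ['-']).length < cs.length := by
  have key : ∀ (fuel : Nat) (l acc : List Char), l.length ≤ fuel →
      (PySem.Chars.replace.go ['-', '-'] ['-'] fuel l acc).length ≤ acc.length + l.length ∧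
      (['-', '-'] <:+: l → (PySem.Chars.replace.go ['-', '-'] ['-'] fuel l acc).length < acc.length + l.length) := by
    intro fuel
    induction fuel with
    | zero =>
      intro l acc hl
      have hl0 : l = [] := List.eq_nil_of_length_eq_zero (Nat.le_zero.mp hl)
      subst hl0
      rw [PySem.Chars.replace.go]
      constructor
      · simp
      · intro hinf
        exact absurd (List.eq_nil_of_infix_nil hinf) (by simp)
    | succ n ih =>
      intro l acc hl
      cases l with
      | nil =>
        rw [PySem.Chars.replace.go]
        · constructor
          · simp
          · intro hinf
            exact absurd (List.eq_nil_of_infix_nil hinf) (by simp)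
        · omega
      | cons c t =>
        rw [PySem.Chars.replace.go]
        by_cases hp : ['-', '-'].isPrefixOf (c :: t) = true
        · simp only [hp, if_true]
          have hpre : ['-', '-'] <+: (c :: t) := List.isPrefixOf_iff_prefix.mp hp
          have hlen2 : 2 ≤ (c :: t).length := by
            have := hpre.length_le; simpa using this
          have hdl : (List.drop ['-', '-'].length (c :: t)).length ≤ n := by
            simp only [List.length_drop]
            simp only [List.length_cons] at hl ⊢
            omega
          have h1 := (ih (List.drop ['-', '-'].length (c :: t)) (['-'].reverse ++ acc) hdl).1
          simp only [List.length_append, List.length_reverse, List.length_drop,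
            List.length_cons, List.length_nil] at h1 hlen2 ⊢
          constructor
          · omega
          · intro _
            omega
        · simp only [hp]
          have ht : t.length ≤ n := by simp only [List.length_cons] at hl; omega
          have h1 := ih t (c :: acc) ht
          constructor
          · refine le_trans h1.1 ?_
            simp only [List.length_cons]; omega
          · intro hinf
            have hinf' : ['-', '-'] <:+: t := by
              rcases List.infix_cons_iff.mp hinf with h' | h'
              · exact absurd (List.isPrefixOf_iff_prefix.mpr h') hp
              · exact h'
            refine lt_of_lt_of_le (h1.2 hinf') ?_
            simp only [List.length_cons]; omega
  have hne : (['-', '-'] : List Char).isEmpty = false := by decide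
  rw [PySem.Chars.replace, hne]
  simp only [Bool.false_eq_true, if_false]
  have := (key cs.length cs [] (le_refl _)).2 h
  simpa using this

-- the 'while "--" in sanitized: sanitized = sanitized.replace("--", "-")' loop
def pyCollapseDashes (cs : List Char) : List Char :=
  if _h : PySem.Chars.isIn ['-', '-'] cs = true then
    pyCollapseDashes (PySem.Chars.replace cs ['-', '-'] ['-'])
  else cs
termination_by cs.length
decreasing_by
  exact pv_replace_dd_len_lt cs ((PySem.Chars.isIn_iff_infix _ _).mp _h)

def to_css_variable_name_py (name : String) (role : String) : String :=
  let s1 := PySem.Chars.replace name.toList [' '] ['-']            -- name.replace(" ", "-")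
  let s2 := PySem.Chars.replace s1 ['&'] ['a', 'n', 'd']          -- .replace("&", "and")
  let s3 := PySem.Chars.replace s2 ['('] []                        -- .replace("(", "")
  let s4 := PySem.Chars.replace s3 [')'] []                        -- .replace(")", "")
  let s5 := s4.filter (fun c => PySem.Chars.isalnum c || c == '-') -- "".join(c for c in s if c.isalnum() or c == "-")
  let s6 := PySem.Chars.lower s5                                   -- .lower()
  let sanitized := pyCollapseDashes s6
  if role ≠ "" ∧ role ≠ "default" then
    if sanitized = role.toList then String.ofList ("--color-".toList ++ role.toList)
    else String.ofList ("--color-".toList ++ role.toList ++ '-' :: sanitized)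
  else String.ofList ("--color-".toList ++ sanitized)

-- ===== PORT B =====
-- the single pass of Source B: out-list building loop with the previous-was-dash flag, as structural recursion
def cssScan : List Char → Bool → List Char
  | [], _ => []
  | c :: rest, prevDash =>
    if c == ' ' || c == '-' then
      if prevDash then cssScan rest true else '-' :: cssScan rest true
    else if c == '&' then 'a' :: 'n' :: 'd' :: cssScan rest false
    else if PySem.Chars.isalnum c then PySem.Chars.lowerChar c :: cssScan rest false
    else cssScan rest prevDash

def to_css_variable_name_py_alt (name : String) (role : String) : String :=
  let sanitized := cssScan name.toList false
  if role ≠ "" ∧ role ≠ "default" then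
    if sanitized = role.toList then String.ofList ("--color-".toList ++ role.toList)
    else String.ofList ("--color-".toList ++ role.toList ++ '-' :: sanitized)
  else String.ofList ("--color-".toList ++ sanitized)

-- ===== PRECONDITION & SPEC =====
def Spec_to_css_variable_name_py (name : String) (role : String) (out : String) : Prop := out = to_css_variable_name_py_alt name role
instance (name : String) (role : String) (out : String) : Decidable (Spec_to_css_variable_name_py name role out) := by unfold Spec_to_css_variable_name_py; infer_instance

-- ===== CLAIM (what is proved, stated in full; the proofs are below) =====
def Claim_equal_to_css_variable_name_py : Prop := ∀ (name : String) (role : String), Dom_to_css_variable_name_py name role → Spec_to_css_variable_name_py name role (to_css_variable_name_py name role)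

-- ===== LEMMAS AND PROOFS =====

-- structural form of replace(s, "--", "-")
def replDD : List Char → List Char
  | [] => []
  | c :: t => if ['-', '-'].isPrefixOf (c :: t) then '-' :: replDD (t.drop 1) else c :: replDD t
termination_by l => l.length
decreasing_by
  · simp only [List.length_drop, List.length_cons]; omega
  · simp

-- dash-squeeze with a previous-was-dash flag: the common normal form of both programs
def sqd : List Char → Bool → List Char
  | [], _ => []
  | c :: t, prev =>
    if c = '-' then (if prev then sqd t true else '-' :: sqd t true) else c :: sqd t false

-- per-character effect of A's whole substitute/filter/lower pipeline
def pipeChar (c : Char) : List Char :=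
  if c = ' ' then ['-']
  else if c = '&' then ['a', 'n', 'd']
  else if c = '(' then []
  else if c = ')' then []
  else if PySem.Chars.isalnum c then [PySem.Chars.lowerChar c]
  else if c = '-' then ['-']
  else []

theorem replace_single (a : Char) (new : List Char) (cs : List Char) :
    PySem.Chars.replace cs [a] new = cs.flatMap (fun c => if c = a then new else [c]) := by
  have key : ∀ (fuel : Nat) (l acc : List Char), l.length ≤ fuel →
      PySem.Chars.replace.go [a] new fuel l acc
        = acc.reverse ++ l.flatMap (fun c => if c = a then new else [c]) := by
    intro fuel
    induction fuel with
    | zero =>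
      intro l acc hl
      have hl0 : l = [] := List.eq_nil_of_length_eq_zero (Nat.le_zero.mp hl)
      subst hl0
      rw [PySem.Chars.replace.go]; simp
    | succ n ih =>
      intro l acc hl
      cases l with
      | nil =>
        rw [PySem.Chars.replace.go]
        · simp
        · omega
      | cons c t =>
        rw [PySem.Chars.replace.go]
        have ht : t.length ≤ n := by simp only [List.length_cons] at hl; omega
        by_cases hc : c = a
        · subst hc
          have hp : [c].isPrefixOf (c :: t) = true := by simp [List.isPrefixOf]
          simp only [hp, if_true, List.length_singleton, List.drop_one, List.tail_cons]
          rw [ih t (new.reverse ++ acc) ht]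
          simp
        · have hp : [a].isPrefixOf (c :: t) = false := by
            simp [List.isPrefixOf]
            intro h; exact absurd h.symm hc
          simp only [hp, Bool.false_eq_true, if_false]
          rw [ih t (c :: acc) ht]
          simp [hc]
  have hne : ([a] : List Char).isEmpty = false := by simp
  rw [PySem.Chars.replace, hne]
  simp only [Bool.false_eq_true, if_false]
  simpa using key cs.length cs [] (le_refl _)

theorem replace_dd_eq_replDD (cs : List Char) :
    PySem.Chars.replace cs ['-', '-'] ['-'] = replDD cs := by
  have key : ∀ (fuel : Nat) (l acc : List Char), l.length ≤ fuel →
      PySem.Chars.replace.go ['-', '-'] ['-'] fuel l acc = acc.reverse ++ replDD l := by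
    intro fuel
    induction fuel with
    | zero =>
      intro l acc hl
      have hl0 : l = [] := List.eq_nil_of_length_eq_zero (Nat.le_zero.mp hl)
      subst hl0
      rw [PySem.Chars.replace.go]; simp [replDD]
    | succ n ih =>
      intro l acc hl
      cases l with
      | nil =>
        rw [PySem.Chars.replace.go]
        · simp [replDD]
        · omega
      | cons c t =>
        rw [PySem.Chars.replace.go, replDD]
        have ht : t.length ≤ n := by simp only [List.length_cons] at hl; omega
        by_cases hp : ['-', '-'].isPrefixOf (c :: t) = true
        · simp only [hp, if_true]
          have hdl : (List.drop ['-', '-'].length (c :: t)).length ≤ n := by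
            simp only [List.length_drop, List.length_cons]; omega
          rw [ih _ _ hdl]
          simp
        · simp only [hp, Bool.false_eq_true, if_false]
          rw [ih t (c :: acc) ht]
          simp
  have hne : (['-', '-'] : List Char).isEmpty = false := by decide
  rw [PySem.Chars.replace, hne]
  simp only [Bool.false_eq_true, if_false]
  simpa using key cs.length cs [] (le_refl _)

theorem sq_replDD : ∀ (n : Nat) (l : List Char), l.length ≤ n → ∀ b, sqd (replDD l) b = sqd l b := by
  intro n
  induction n with
  | zero =>
    intro l hl b
    have hl0 : l = [] := List.eq_nil_of_length_eq_zero (Nat.le_zero.mp hl)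
    subst hl0; rw [replDD]
  | succ n ih =>
    intro l hl b
    cases l with
    | nil => rw [replDD]
    | cons c t =>
      rw [replDD]
      by_cases hp : ['-', '-'].isPrefixOf (c :: t) = true
      · simp only [hp, if_true]
        rcases List.isPrefixOf_iff_prefix.mp hp with ⟨r, hr⟩
        have hc : c = '-' := by
          have := congrArg (fun l => l.head?) hr; simpa using this.symm
        obtain ⟨t', ht'⟩ : ∃ t', t = '-' :: t' := by
          cases t with
          | nil => simp [hc] at hr
          | cons d t' =>
            refine ⟨t', ?_⟩
            have : d = '-' := by
              simp only [List.cons_append] at hr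
              have := congrArg (fun l => l.tail.head?) hr
              simpa using this.symm
            rw [this]
        subst hc ht'
        simp only [List.drop_one, List.tail_cons]
        have ht'len : t'.length ≤ n := by simp only [List.length_cons] at hl; omega
        have h2 := ih t' ht'len true
        cases b <;> simp [sqd, h2]
      · simp only [hp, Bool.false_eq_true, if_false]
        have ht : t.length ≤ n := by simp only [List.length_cons] at hl; omega
        by_cases hc : c = '-'
        · subst hc
          cases b <;> simp [sqd, ih t ht true]
        · simp [sqd, hc, ih t ht false]

theorem sq_no_dd : ∀ (l : List Char), ¬(['-', '-'] <:+: l) →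
    (sqd l false = l ∧ (l.head? ≠ some '-' → sqd l true = l)) := by
  intro l
  induction l with
  | nil => intro _; exact ⟨rfl, fun _ => rfl⟩
  | cons c t ih =>
    intro h
    have hnp : ¬(['-', '-'] <+: (c :: t)) := fun h' => h (h'.isInfix)
    have hnt : ¬(['-', '-'] <:+: t) := fun h' => h (List.infix_cons_iff.mpr (Or.inr h'))
    have iht := ih hnt
    constructor
    · by_cases hc : c = '-'
      · subst hc
        have hth : t.head? ≠ some '-' := by
          intro hh
          cases t with
          | nil => simp at hh
          | cons d t' =>
            simp only [List.head?_cons, Option.some.injEq] at hh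
            exact hnp ⟨t', by simp [hh]⟩
        simp [sqd, iht.2 hth]
      · simp [sqd, hc, iht.1]
    · intro hh
      have hc : c ≠ '-' := by simpa using hh
      simp [sqd, hc, iht.1]

theorem collapse_eq_sq : ∀ (n : Nat) (l : List Char), l.length ≤ n →
    pyCollapseDashes l = sqd l false := by
  intro n
  induction n with
  | zero =>
    intro l hl
    have hl0 : l = [] := List.eq_nil_of_length_eq_zero (Nat.le_zero.mp hl)
    subst hl0
    rw [pyCollapseDashes]
    have h0 : ¬ PySem.Chars.isIn ['-', '-'] ([] : List Char) = true := by decide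
    rw [dif_neg h0]
    rfl
  | succ n ih =>
    intro l hl
    rw [pyCollapseDashes]
    by_cases hin : PySem.Chars.isIn ['-', '-'] l = true
    · rw [dif_pos hin]
      have hinf := (PySem.Chars.isIn_iff_infix _ _).mp hin
      have hlt := pv_replace_dd_len_lt l hinf
      have hle : (PySem.Chars.replace l ['-', '-'] ['-']).length ≤ n := by omega
      rw [ih (PySem.Chars.replace l ['-', '-'] ['-']) hle, replace_dd_eq_replDD]
      exact sq_replDD l.length l (le_refl _) false
    · rw [dif_neg hin]
      have hninf : ¬(['-', '-'] <:+: l) := fun h => hin ((PySem.Chars.isIn_iff_infix _ _).mpr h)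
      exact ((sq_no_dd l hninf).1).symm

theorem pipeline_eq (cs : List Char) :
    PySem.Chars.lower
      ((PySem.Chars.replace
          (PySem.Chars.replace
            (PySem.Chars.replace (PySem.Chars.replace cs [' '] ['-']) ['&'] ['a', 'n', 'd'])
            ['('] [])
          [')'] []).filter (fun c => PySem.Chars.isalnum c || c == '-'))
    = cs.flatMap pipeChar := by
  rw [replace_single, replace_single, replace_single, replace_single]
  simp only [PySem.Chars.lower, List.map_flatMap, List.filter_flatMap, List.flatMap_assoc]
  congr 1
  funext c
  by_cases h1 : c = ' '
  · subst h1; decide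
  by_cases h2 : c = '&'
  · subst h2; decide
  by_cases h3 : c = '('
  · subst h3; decide
  by_cases h4 : c = ')'
  · subst h4; decide
  by_cases h5 : c = '-'
  · subst h5; decide
  by_cases h6 : PySem.Chars.isalnum c = true
  · simp [pipeChar, h1, h2, h3, h4, h6, PySem.Chars.lowerChar]
  · simp [pipeChar, h1, h2, h3, h4, h5, h6]

theorem lowerChar_ne_dash (c : Char) (h : PySem.Chars.isalnum c = true) :
    PySem.Chars.lowerChar c ≠ '-' := by
  have hA : ('A' : Char).val.toNat = 65 := by decide
  have hZ : ('Z' : Char).val.toNat = 90 := by decide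
  have ha : ('a' : Char).val.toNat = 97 := by decide
  have hz : ('z' : Char).val.toNat = 122 := by decide
  have h0 : ('0' : Char).val.toNat = 48 := by decide
  have h9 : ('9' : Char).val.toNat = 57 := by decide
  have hd : ('-' : Char).val.toNat = 45 := by decide
  simp only [PySem.Chars.isalnum, PySem.Chars.isalpha, PySem.Chars.isdigit,
    PySem.Chars.isupper, PySem.Chars.islower, Bool.or_eq_true, Bool.and_eq_true,
    decide_eq_true_eq, Char.le_def, UInt32.le_iff_toNat_le] at h
  simp only [PySem.Chars.lowerChar, PySem.Chars.isupper, Bool.and_eq_true, decide_eq_true_eq,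
    Char.le_def, UInt32.le_iff_toNat_le]
  split
  · next hup =>
    intro heq
    have hv := congrArg Char.toNat heq
    rw [Char.toNat_ofNat] at hv
    have hvalid : (c.toNat + 32).isValidChar := by
      constructor
      show c.toNat + 32 < 55296
      simp only [Char.toNat] at *
      omega
    rw [if_pos hvalid] at hv
    simp only [Char.toNat] at *
    omega
  · next hup =>
    intro heq
    have hv := congrArg Char.toNat heq
    simp only [Char.toNat, not_and, not_le] at *
    omega

theorem scan_eq_sq (cs : List Char) : ∀ b, cssScan cs b = sqd (cs.flatMap pipeChar) b := by
  induction cs with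
  | nil => intro b; rfl
  | cons c t ih =>
    intro b
    rw [cssScan, List.flatMap_cons]
    by_cases h1 : c = ' '
    · subst h1
      cases b <;> simp [pipeChar, sqd, ih]
    by_cases h5 : c = '-'
    · subst h5
      have hd : PySem.Chars.isalnum '-' = false := by decide
      cases b <;> simp [pipeChar, sqd, hd, ih]
    by_cases h2 : c = '&'
    · subst h2
      simp [pipeChar, sqd, ih]
    by_cases h6 : PySem.Chars.isalnum c = true
    · have hne := lowerChar_ne_dash c h6
      have h3 : ¬ c = '(' := by rintro rfl; exact absurd h6 (by decide)
      have h4 : ¬ c = ')' := by rintro rfl; exact absurd h6 (by decide)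
      simp [pipeChar, sqd, h1, h2, h3, h4, h5, h6, hne, ih]
    · simp [pipeChar, h1, h2, h5, h6, ih]

theorem sanitized_eq (name : String) :
    pyCollapseDashes
      (PySem.Chars.lower
        ((PySem.Chars.replace
            (PySem.Chars.replace
              (PySem.Chars.replace (PySem.Chars.replace name.toList [' '] ['-']) ['&'] ['a', 'n', 'd'])
              ['('] [])
            [')'] []).filter (fun c => PySem.Chars.isalnum c || c == '-')))
    = cssScan name.toList false := by
  rw [pipeline_eq, collapse_eq_sq (name.toList.flatMap pipeChar).length _ (le_refl _),
    scan_eq_sq]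

-- ===== VERDICT (by name: the statement is the Claim_ definition above) =====
theorem to_css_variable_name_py_spec : Claim_equal_to_css_variable_name_py := by
  intro name role _
  unfold Spec_to_css_variable_name_py to_css_variable_name_py to_css_variable_name_py_alt
  simp only [sanitized_eq]
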